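-- pv_equiv track=rewrite | github.com/LivingEarthLab/cube-in-a-box | shared/notebooks_demo/utils/le_stac_to_filesystem.py | _invert_grouped_dictionary
-- ===== SOURCE A (Python) =====
-- from collections import defaultdict
-- from typing import Any, Dict, Iterable, List, Optional, Pattern, Tuple, Union
--
-- def _invert_grouped_dictionary(grouped_dict: Dict[str, List[str]]) -> Dict[str, List[str]]:
--     """Invert dictionary to group parent folders with identical file parts.
--
--     Args:
--         grouped_dict: Dict mapping parent folder names to lists of file parts.
--
--     Returns:
--         Dict mapping sorted file parts lists to parent folders containing them.
--     """
--     inverted_dict = defaultdict(list)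
--
--     for parent_folder, file_parts in grouped_dict.items():
--         file_tuple = tuple(sorted(file_parts))
--         inverted_dict[file_tuple].append(parent_folder)
--
--     return {
--         str(list(key)): sorted(folders)
--         for key, folders in inverted_dict.items()
--     }
-- ===== SOURCE B (Python) =====
-- def _invert_grouped_dictionary(grouped_dict):
--     """Two-pass reimplementation: project to (sorted-parts key, folder) pairs,
--     take the distinct keys in first-occurrence order, then collect each
--     group's folders with a scan per key (no defaultdict accumulation)."""
--     keyed = [(tuple(sorted(parts)), folder) for folder, parts in grouped_dict.items()]
--     seen = list(dict.fromkeys(k for k, _ in keyed))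
--     return {
--         str(list(k)): sorted([f for kk, f in keyed if kk == k])
--         for k in seen
--     }
-- ===== Notes on version B (the rewrite author's own statement) =====
-- stated objective: alternative
-- what changed: Replaces the one-pass defaultdict accumulation with a two-phase decomposition: project every entry to a (sorted-parts key, folder) pair, take the distinct keys in first-occurrence order via dict.fromkeys, then build each group's folder list by a comprehension scan over the keyed pairs.
import Mathlib
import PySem

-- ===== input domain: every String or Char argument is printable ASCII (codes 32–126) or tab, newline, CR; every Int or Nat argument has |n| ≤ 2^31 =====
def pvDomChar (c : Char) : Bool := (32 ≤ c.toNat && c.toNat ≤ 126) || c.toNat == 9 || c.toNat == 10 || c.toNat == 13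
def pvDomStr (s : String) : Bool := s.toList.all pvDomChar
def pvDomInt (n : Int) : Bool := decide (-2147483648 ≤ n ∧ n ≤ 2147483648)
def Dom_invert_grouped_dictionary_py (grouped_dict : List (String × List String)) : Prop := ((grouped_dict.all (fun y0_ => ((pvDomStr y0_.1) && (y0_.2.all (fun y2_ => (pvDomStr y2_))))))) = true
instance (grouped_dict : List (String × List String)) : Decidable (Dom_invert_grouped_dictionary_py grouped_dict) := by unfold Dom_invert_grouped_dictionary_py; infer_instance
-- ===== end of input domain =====

-- B replaces A's one-pass defaultdict grouping by a two-phase decomposition (project to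
-- (sorted-key, folder) pairs, ordered-dedup the keys, then one scan per distinct key);
-- alternative structure, same cost class, equal output proved for all inputs.


-- ===== PORT A =====
-- Shared library helper: Python's repr(s), exact on the domain's characters
-- (printable ASCII stays itself; backslash, the chosen quote, tab, newline, CR are escaped;
-- double quotes are used iff the string contains ' and no ").  Both Pythons call str(list(key)),
-- so both ports use the same helper.
def pyReprChar (q : Char) (c : Char) : List Char :=
  if c = '\\' then ['\\', '\\']
  else if c = q then ['\\', q]
  else if c = '\t' then ['\\', 't']
  else if c = '\n' then ['\\', 'n']
  else if c = '\r' then ['\\', 'r']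
  else [c]

def pyReprStr (s : String) : String :=
  let cs := s.toList
  let q : Char := if '\'' ∈ cs ∧ '"' ∉ cs then '"' else '\''
  String.ofList (q :: (cs.flatMap (pyReprChar q) ++ [q]))

-- str(list(key)) for a key that is a tuple of strings
def pyStrOfKey (key : List String) : String :=
  "[" ++ PySem.Str.join ", " (key.map pyReprStr) ++ "]"

-- literal port of A: defaultdict(list) accumulation, then a dict comprehension
def invert_grouped_dictionary_py (grouped_dict : List (String × List String)) : List (String × List String) :=
  let inverted :=
    grouped_dict.foldl
      (fun d p => d.modify (PySem.List.sorted p.2 (fun x => x)) [] (fun fs => fs ++ [p.1]))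
      (PySem.Dict.empty : PySem.Dict (List String) (List String))
  (inverted.items.foldl
      (fun out kv => out.insert (pyStrOfKey kv.1) (PySem.List.sorted kv.2 (fun x => x)))
      (PySem.Dict.empty : PySem.Dict String (List String))).items

-- ===== PORT B =====
-- literal port of Source B: keyed pairs, ordered dedup of the keys, one filter scan per key
def invert_grouped_dictionary_py_alt (grouped_dict : List (String × List String)) : List (String × List String) :=
  let keyed := grouped_dict.map (fun p => (PySem.List.sorted p.2 (fun x => x), p.1))
  let seen := PySem.List.dedup (keyed.map (fun kf => kf.1))
  (seen.foldl
      (fun out k =>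
        out.insert (pyStrOfKey k)
          (PySem.List.sorted ((keyed.filter (fun kf => kf.1 == k)).map (fun kf => kf.2)) (fun x => x)))
      (PySem.Dict.empty : PySem.Dict String (List String))).items

-- ===== PRECONDITION & SPEC =====
def Spec_invert_grouped_dictionary_py (grouped_dict : List (String × List String)) (out : List (String × List String)) : Prop := out = invert_grouped_dictionary_py_alt grouped_dict
instance (grouped_dict : List (String × List String)) (out : List (String × List String)) : Decidable (Spec_invert_grouped_dictionary_py grouped_dict out) := by unfold Spec_invert_grouped_dictionary_py; infer_instance

-- ===== CLAIM (what is proved, stated in full; the proofs are below) =====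
def Claim_equal_invert_grouped_dictionary_py : Prop := ∀ (grouped_dict : List (String × List String)), Dom_invert_grouped_dictionary_py grouped_dict → Spec_invert_grouped_dictionary_py grouped_dict (invert_grouped_dictionary_py grouped_dict)

-- ===== LEMMAS AND PROOFS =====
theorem invert_grouped_dictionary_eq (g : List (String × List String)) :
    invert_grouped_dictionary_py g = invert_grouped_dictionary_py_alt g := by
  simp only [invert_grouped_dictionary_py, invert_grouped_dictionary_py_alt]
  -- the keyed pairs B materialises
  set keyed : List (List String × String) :=
    g.map (fun p => (PySem.List.sorted p.2 (fun x => x), p.1)) with hkeyed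
  -- A's accumulation loop over g is the corresponding loop over the keyed pairs
  have hfold :
      g.foldl
        (fun d p => d.modify (PySem.List.sorted p.2 (fun x => x)) [] (fun fs => fs ++ [p.1]))
        (PySem.Dict.empty : PySem.Dict (List String) (List String))
      = keyed.foldl (fun d p => d.modify p.1 [] (fun fs => fs ++ [p.2])) PySem.Dict.empty := by
    rw [hkeyed, List.foldl_map]
  rw [hfold]
  set inv := keyed.foldl (fun d p => d.modify p.1 [] (fun fs => fs ++ [p.2]))
      (PySem.Dict.empty : PySem.Dict (List String) (List String)) with hinv
  have hnd : inv.keys.Nodup := by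
    rw [hinv]
    exact PySem.Dict.nodup_keys_foldl_modify_key keyed (fun p => p.1) [] (fun _ p fs => fs ++ [p.2])
      PySem.Dict.empty (by simp)
  -- A's dict keys are B's ordered dedup of the keyed keys
  have hkeys : inv.keys = PySem.List.dedup (keyed.map (fun kf => kf.1)) := by
    rw [hinv, PySem.Dict.keys_foldl_modify_key keyed (fun p => p.1) [] (fun _ p fs => fs ++ [p.2])
      PySem.Dict.empty]
    simp [PySem.Set.update_nil_left]
  -- A's accumulated group at k is B's filter scan
  have hgetD : ∀ k, inv.getD k [] = (keyed.filter (fun kf => kf.1 == k)).map (fun kf => kf.2) := by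
    intro k
    rw [hinv, PySem.Dict.getD_foldl_modify_append keyed PySem.Dict.empty k]
    simp
  have hitems : inv.items =
      inv.keys.map (fun k => (k, (keyed.filter (fun kf => kf.1 == k)).map (fun kf => kf.2))) := by
    rw [PySem.Dict.items_eq_map_keys inv hnd []]
    exact List.map_congr_left (fun k _ => by rw [hgetD k])
  rw [hitems, hkeys, List.foldl_map]

-- ===== VERDICT (by name: the statement is the Claim_ definition above) =====
theorem invert_grouped_dictionary_py_spec : Claim_equal_invert_grouped_dictionary_py := by
  intro g _
  unfold Spec_invert_grouped_dictionary_py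
  exact invert_grouped_dictionary_eq g
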